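-- pv_equiv track=rewrite | github.com/siriknikita/openforge | backend/app/services/github_service.py | validate_repository_name
-- ===== SOURCE A (Python) =====
-- def validate_repository_name(name: str) -> bool:
--     """
--     Validate repository name according to GitHub rules
--
--     Args:
--         name: Repository name to validate
--
--     Returns:
--         True if valid, False otherwise
--     """
--     if not name or len(name) < 1 or len(name) > 100:
--         return False
--
--     # GitHub allows: alphanumeric, hyphens, underscores, dots
--     # Cannot start or end with a dot, hyphen, or underscore
--     if name.startswith(('.', '-', '_')) or name.endswith(('.', '-', '_')):
--         return False
--
--     # Check for valid characters
--     valid_chars = set('abcdefghijklmnopqrstuvwxyzABCDEFGHIJKLMNOPQRSTUVWXYZ0123456789-._')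
--     if not all(c in valid_chars for c in name):
--         return False
--
--     return True
-- ===== SOURCE B (Python) =====
-- import re
--
-- _NAME_RE = re.compile(r'[A-Za-z0-9]([A-Za-z0-9._-]*[A-Za-z0-9])?')
--
--
-- def validate_repository_name(name: str) -> bool:
--     if not name or len(name) > 100:
--         return False
--     return _NAME_RE.fullmatch(name) is not None
-- ===== Notes on version B (the rewrite author's own statement) =====
-- stated objective: idiomatic
-- what changed: Replaces the startswith/endswith tuple checks and the per-character set scan with a single anchored regex fullmatch encoding first/last-char-alphanumeric and interior character class at once, after the same length guard.
import Mathlib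
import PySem

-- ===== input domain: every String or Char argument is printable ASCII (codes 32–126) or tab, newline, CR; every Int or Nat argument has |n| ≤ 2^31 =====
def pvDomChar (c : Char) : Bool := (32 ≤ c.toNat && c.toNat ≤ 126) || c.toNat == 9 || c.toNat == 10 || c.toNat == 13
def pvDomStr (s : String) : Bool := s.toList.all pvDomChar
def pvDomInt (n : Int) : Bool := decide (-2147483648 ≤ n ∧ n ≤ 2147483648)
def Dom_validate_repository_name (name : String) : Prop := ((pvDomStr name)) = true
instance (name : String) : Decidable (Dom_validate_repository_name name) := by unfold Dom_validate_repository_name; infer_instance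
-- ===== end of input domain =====

set_option maxRecDepth 4000


-- B replaces the startswith/endswith tuple checks and the per-character set scan with one
-- anchored regex fullmatch (idiomatic); return value equivalence on printable-ASCII strings.

-- ===== PORT A =====
-- valid_chars = set('abc…-._')
def pvValidChars : PySem.Set Char :=
  PySem.Set.ofList "abcdefghijklmnopqrstuvwxyzABCDEFGHIJKLMNOPQRSTUVWXYZ0123456789-._".toList

def validate_repository_name (name : String) : Bool :=
  -- if not name or len(name) < 1 or len(name) > 100: return False
  if name.toList.isEmpty || PySem.Str.len name < 1 || PySem.Str.len name > 100 then false
  -- if name.startswith(('.', '-', '_')) or name.endswith(('.', '-', '_')): return False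
  else if (PySem.Str.startswith name "." || PySem.Str.startswith name "-" || PySem.Str.startswith name "_")
       || (PySem.Str.endswith name "." || PySem.Str.endswith name "-" || PySem.Str.endswith name "_") then false
  -- if not all(c in valid_chars for c in name): return False
  else if !(name.toList.all (fun c => PySem.Set.contains pvValidChars c)) then false
  else true

-- ===== PORT B =====
-- the regex character classes: [A-Za-z0-9] and [A-Za-z0-9._-]
def pvReAlnum (c : Char) : Bool :=
  ('A' ≤ c && c ≤ 'Z') || ('a' ≤ c && c ≤ 'z') || ('0' ≤ c && c ≤ '9')

def pvReClass (c : Char) : Bool :=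
  pvReAlnum c || c == '.' || c == '_' || c == '-'

-- fullmatch of r'([A-Za-z0-9._-]*[A-Za-z0-9])?' : interior chars in the class, last char alphanumeric
def pvTailMatch : List Char → Bool
  | [] => true
  | [d] => pvReAlnum d
  | d :: ds => pvReClass d && pvTailMatch ds

-- fullmatch of r'[A-Za-z0-9]([A-Za-z0-9._-]*[A-Za-z0-9])?'
def pvFullMatch : List Char → Bool
  | [] => false
  | c :: rest => pvReAlnum c && pvTailMatch rest

def validate_repository_name_alt (name : String) : Bool :=
  -- if not name or len(name) > 100: return False
  if name.toList.isEmpty || PySem.Str.len name > 100 then false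
  -- return _NAME_RE.fullmatch(name) is not None
  else pvFullMatch name.toList

-- ===== PRECONDITION & SPEC =====
def Spec_validate_repository_name (name : String) (out : Bool) : Prop := out = validate_repository_name_alt name
instance (name : String) (out : Bool) : Decidable (Spec_validate_repository_name name out) := by unfold Spec_validate_repository_name; infer_instance

-- ===== CLAIM (what is proved, stated in full; the proofs are below) =====
def Claim_equal_validate_repository_name : Prop := ∀ (name : String), Dom_validate_repository_name name → Spec_validate_repository_name name (validate_repository_name name)

-- ===== LEMMAS AND PROOFS =====

-- on ASCII (Dom) characters: membership in A's set equals B's interior class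
theorem contains_eq_reClass (c : Char) (h : pvDomChar c = true) :
    PySem.Set.contains pvValidChars c = pvReClass c := by
  have hle : c.toNat ≤ 126 := by
    unfold pvDomChar at h
    simp only [Bool.or_eq_true, Bool.and_eq_true, decide_eq_true_eq, beq_iff_eq] at h
    omega
  have key : ∀ n : Nat, n < 127 →
      PySem.Set.contains pvValidChars (Char.ofNat n) = pvReClass (Char.ofNat n) := by decide
  have := key c.toNat (by omega)
  rwa [Char.ofNat_toNat] at this

-- pure character fact: alphanumeric = in the class and not '.', '-', '_'
theorem reAlnum_eq (c : Char) (h : pvDomChar c = true) :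
    pvReAlnum c = (pvReClass c && !(c == '.') && !(c == '-') && !(c == '_')) := by
  have hle : c.toNat ≤ 126 := by
    unfold pvDomChar at h
    simp only [Bool.or_eq_true, Bool.and_eq_true, decide_eq_true_eq, beq_iff_eq] at h
    omega
  have key : ∀ n : Nat, n < 127 →
      pvReAlnum (Char.ofNat n) = (pvReClass (Char.ofNat n) && !(Char.ofNat n == '.') && !(Char.ofNat n == '-') && !(Char.ofNat n == '_')) := by decide
  have := key c.toNat (by omega)
  rwa [Char.ofNat_toNat] at this

theorem startswith_singleton (cs : List Char) (d : Char) :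
    PySem.Chars.startswith cs [d] = (cs.head? == some d) := by
  cases cs with
  | nil => simp [PySem.Chars.startswith]
  | cons c rest =>
    simp [PySem.Chars.startswith, List.isPrefixOf, eq_comm]

theorem endswith_singleton (cs : List Char) (d : Char) :
    PySem.Chars.endswith cs [d] = (cs.getLast? == some d) := by
  rw [Bool.eq_iff_iff, PySem.Chars.endswith_iff, beq_iff_eq, List.getLast?_eq_some_iff]
  constructor
  · rintro ⟨t, ht⟩; exact ⟨t, ht.symm⟩
  · rintro ⟨t, ht⟩; exact ⟨t, ht.symm⟩

theorem tail_lemma : ∀ rs : List Char, rs.all pvDomChar = true →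
    pvTailMatch rs = ((rs.all (fun c => PySem.Set.contains pvValidChars c))
      && !(rs.getLast? == some '.') && !(rs.getLast? == some '-') && !(rs.getLast? == some '_'))
  | [], _ => by simp [pvTailMatch]
  | [d], h => by
    simp only [List.all_cons, List.all_nil, Bool.and_true] at h
    simp only [pvTailMatch, List.all_cons, List.all_nil, List.getLast?_singleton,
      reAlnum_eq d h, contains_eq_reClass d h, Bool.and_true]
    rw [Bool.eq_iff_iff]
    simp only [Bool.and_eq_true, Bool.not_eq_eq_eq_not, Bool.not_true, beq_eq_false_iff_ne,
      Option.some.injEq, ne_eq, Bool.and_assoc]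
  | d :: e :: ds, h => by
    simp only [List.all_cons, Bool.and_eq_true] at h
    have ih := tail_lemma (e :: ds) (by simp [h.2.1, h.2.2])
    simp only [pvTailMatch, ih, contains_eq_reClass d h.1, List.all_cons, List.getLast?_cons_cons]
    rw [Bool.eq_iff_iff]
    simp only [Bool.and_eq_true]
    tauto


theorem fullmatch_eq (c : Char) (rest : List Char)
    (h1 : pvDomChar c = true) (h2 : rest.all pvDomChar = true) :
    pvFullMatch (c :: rest) =
      (!(PySem.Chars.startswith (c :: rest) ['.'] || PySem.Chars.startswith (c :: rest) ['-']
          || PySem.Chars.startswith (c :: rest) ['_']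
          || (PySem.Chars.endswith (c :: rest) ['.'] || PySem.Chars.endswith (c :: rest) ['-']
              || PySem.Chars.endswith (c :: rest) ['_']))
        && (c :: rest).all (fun x => PySem.Set.contains pvValidChars x)) := by
  rw [pvFullMatch, reAlnum_eq c h1, tail_lemma rest h2]
  simp only [startswith_singleton, endswith_singleton, List.head?_cons, List.all_cons,
    contains_eq_reClass c h1]
  cases rest with
  | nil =>
    rw [Bool.eq_iff_iff]
    simp
    tauto
  | cons e ds =>
    simp only [List.getLast?_cons_cons, List.all_cons]
    rw [Bool.eq_iff_iff]
    simp only [Bool.and_eq_true, Bool.not_eq_true', Bool.or_eq_false_iff,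
      beq_eq_false_iff_ne, ne_eq, Option.some.injEq]
    tauto

-- ===== VERDICT =====
theorem validate_repository_name_spec : Claim_equal_validate_repository_name := by
  intro name hdom
  unfold Spec_validate_repository_name validate_repository_name validate_repository_name_alt
  have hdom' : name.toList.all pvDomChar = true := hdom
  cases hcs : name.toList with
  | nil => simp [hcs]
  | cons c rest =>
    rw [hcs] at hdom'
    simp only [List.all_cons, Bool.and_eq_true] at hdom'
    split_ifs with h1 h2 h3 h4 h5 h6 h7 <;> try rfl
    -- h1 true, h2 false: 1 ≤ len ≤ 100 contradiction
    · exfalso; simp [PySem.Str.len_eq, hcs] at h1 h2; omega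
    -- starts/ends with a forbidden char: fullmatch is false too
    · rw [fullmatch_eq c rest hdom'.1 hdom'.2]
      simp only [PySem.Str.startswith_eq, PySem.Str.endswith_eq, hcs, show ".".toList = ['.'] from rfl, show "-".toList = ['-'] from rfl, show "_".toList = ['_'] from rfl] at h3
      rw [h3]
      simp
    -- some character outside the valid set: fullmatch is false too
    · rw [fullmatch_eq c rest hdom'.1 hdom'.2]
      have h5' : ((c :: rest).all fun x => pvValidChars.contains x) = false := by
        simp only [Bool.not_eq_true'] at h5
        exact h5
      rw [h5']
      simp
    -- h1 false, cond2 true: contradiction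
    · exfalso; simp [PySem.Str.len_eq, hcs] at h1 h7; omega
    -- main case: no forbidden boundary char, all chars valid
    · rw [fullmatch_eq c rest hdom'.1 hdom'.2]
      simp only [PySem.Str.startswith_eq, PySem.Str.endswith_eq, hcs, show ".".toList = ['.'] from rfl, show "-".toList = ['-'] from rfl, show "_".toList = ['_'] from rfl] at h3
      simp only [Bool.not_eq_true] at h3 h5
      rw [h3]
      simp only [Bool.not_false, Bool.true_and]
      simpa using h5
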